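-- pv_equiv track=rewrite | github.com/ziyisun85-ops/RL_fish | utils/lora_td3_policy.py | resolve_td3_lora_target_modules
-- ===== SOURCE A (Python) =====
-- def resolve_td3_lora_target_modules(target_modules: tuple[str, ...] | list[str]) -> tuple[str, ...]:
--     resolved: list[str] = []
--     seen: set[str] = set()
--
--     def _add(module_name: str) -> None:
--         module_name = str(module_name)
--         if module_name in seen:
--             return
--         seen.add(module_name)
--         resolved.append(module_name)
--
--     for module_name in target_modules:
--         module_name = str(module_name)
--         _add(module_name)
--         if module_name.startswith("actor."):
--             _add(f"actor_target.{module_name.split('actor.', 1)[1]}")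
--         elif module_name.startswith("actor_target."):
--             _add(f"actor.{module_name.split('actor_target.', 1)[1]}")
--
--     return tuple(resolved)
-- ===== SOURCE B (Python) =====
-- def _mirror(name):
--     if name.startswith("actor."):
--         return "actor_target." + name[len("actor."):]
--     if name.startswith("actor_target."):
--         return "actor." + name[len("actor_target."):]
--     return None
--
--
-- def _dedup(names):
--     out = []
--     rest = list(names)
--     while rest:
--         head = rest[0]
--         out.append(head)
--         rest = [n for n in rest[1:] if n != head]
--     return tuple(out)
--
--
-- def resolve_td3_lora_target_modules(target_modules):
--     expanded = []
--     for raw in target_modules: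
--         name = str(raw)
--         m = _mirror(name)
--         expanded += [name] if m is None else [name, m]
--     return _dedup(expanded)
-- ===== Notes on version B (the rewrite author's own statement) =====
-- stated objective: alternative
-- what changed: Replaces A's fused single pass with a seen-set and _add closure by two stages: a mirror helper expands each name into a flat list, then duplicates are removed with no set or dict by repeatedly emitting the head and filtering it out of the remainder; this trades A's hash lookups for repeated list filtering (quadratic in the number of names).
import Mathlib
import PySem

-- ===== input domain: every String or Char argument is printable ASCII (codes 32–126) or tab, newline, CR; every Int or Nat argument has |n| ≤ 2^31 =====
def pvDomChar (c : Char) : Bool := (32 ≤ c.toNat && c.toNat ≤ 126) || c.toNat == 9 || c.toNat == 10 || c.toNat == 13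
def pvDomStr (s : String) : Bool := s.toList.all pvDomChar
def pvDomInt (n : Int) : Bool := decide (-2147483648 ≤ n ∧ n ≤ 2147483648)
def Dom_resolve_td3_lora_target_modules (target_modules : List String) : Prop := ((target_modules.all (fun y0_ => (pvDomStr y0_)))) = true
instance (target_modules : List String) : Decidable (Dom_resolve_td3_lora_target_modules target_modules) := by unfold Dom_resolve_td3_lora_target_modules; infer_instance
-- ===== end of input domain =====

-- B splits A's fused dedup-while-expanding loop into a mirror-helper expansion pass followed by a
-- set-free filter-based dedup (take the head, filter it out of the rest); same return value.

-- ===== PORT A =====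
-- A's `str(module_name)` on a str is the identity and is omitted. Under the startswith guard,
-- `name.split(p, 1)` succeeds and has an element at index 1, so the `getD` defaults below are
-- never taken — exact on every input.
def pvAddA (st : List String × PySem.Set String) (name : String) : List String × PySem.Set String :=
  if PySem.Set.contains st.2 name then st else (st.1 ++ [name], PySem.Set.add st.2 name)

def pvStepA (st : List String × PySem.Set String) (name : String) : List String × PySem.Set String :=
  let st := pvAddA st name
  if PySem.Str.startswith name "actor." then
    pvAddA st (PySem.Str.join "" ["actor_target.", ((PySem.Str.splitMax? name "actor." 1).getD []).getD 1 ""])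
  else if PySem.Str.startswith name "actor_target." then
    pvAddA st (PySem.Str.join "" ["actor.", ((PySem.Str.splitMax? name "actor_target." 1).getD []).getD 1 ""])
  else st

def resolve_td3_lora_target_modules (target_modules : List String) : List String :=
  (target_modules.foldl pvStepA ([], PySem.Set.empty)).1

-- ===== PORT B =====
-- _mirror: the actor/actor_target counterpart of a name, or None
def pvMirror (name : String) : Option String :=
  if PySem.Str.startswith name "actor." then
    some (PySem.Str.join "" ["actor_target.", PySem.Str.slice name (some 6) none])
  else if PySem.Str.startswith name "actor_target." then
    some (PySem.Str.join "" ["actor.", PySem.Str.slice name (some 13) none])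
  else none

-- _dedup's while loop: emit the head, filter it out of the remainder, repeat
def pvDedup : List String → List String
  | [] => []
  | h :: t => h :: pvDedup (t.filter (fun n => n != h))
termination_by xs => xs.length
decreasing_by simpa using Nat.lt_succ_of_le (List.length_filter_le _ _)

def resolve_td3_lora_target_modules_alt (target_modules : List String) : List String :=
  pvDedup (target_modules.foldl
    (fun expanded name =>
      expanded ++ (match pvMirror name with | none => [name] | some m => [name, m])) [])

-- ===== PRECONDITION & SPEC =====
def Spec_resolve_td3_lora_target_modules (target_modules : List String) (out : List String) : Prop := out = resolve_td3_lora_target_modules_alt target_modules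
instance (target_modules : List String) (out : List String) : Decidable (Spec_resolve_td3_lora_target_modules target_modules out) := by unfold Spec_resolve_td3_lora_target_modules; infer_instance

-- ===== CLAIM (what is proved, stated in full; the proofs are below) =====
def Claim_equal_resolve_td3_lora_target_modules : Prop := ∀ (target_modules : List String), Dom_resolve_td3_lora_target_modules target_modules → Spec_resolve_td3_lora_target_modules target_modules (resolve_td3_lora_target_modules target_modules)

-- ===== LEMMAS AND PROOFS =====

-- the (one or two) module names emitted per input name, shared normal form
def pvItems (name : String) : List String :=
  match pvMirror name with | none => [name] | some m => [name, m]

lemma pv_go_zero (p : List Char) (fuel : Nat) (l : List Char) :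
    PySem.Chars.splitOnMax.go p fuel 0 l [] [[]] = [[], l] := by
  cases fuel <;> cases l <;> simp [PySem.Chars.splitOnMax.go]

lemma pv_splitOnMax_prefix (s p : List Char) (hp : p ≠ []) (h : p.isPrefixOf s = true) :
    PySem.Chars.splitOnMax s p 1 = [[], s.drop p.length] := by
  cases s with
  | nil =>
    cases p with
    | nil => exact absurd rfl hp
    | cons c cs => simp [List.isPrefixOf] at h
  | cons c rest =>
    simp only [PySem.Chars.splitOnMax, show ¬ ((1:Int) < 0) by norm_num, if_false]
    simp [PySem.Chars.splitOnMax.go, h, pv_go_zero]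

-- A's `name.split(p, 1)[1]` equals B's `name[len(p):]` when name starts with p
lemma pv_split_eq_slice (name p : String) (k : Nat) (hk : p.toList.length = k)
    (hp : p.toList ≠ []) (h : PySem.Str.startswith name p = true) :
    ((PySem.Str.splitMax? name p 1).getD []).getD 1 ""
      = PySem.Str.slice name (some (k : Int)) none := by
  subst hk
  have h' : p.toList.isPrefixOf name.toList = true := by
    simpa [PySem.Str.startswith, PySem.Chars.startswith] using h
  have hs : PySem.Chars.splitMax? name.toList p.toList 1
      = some [[], name.toList.drop p.toList.length] := by
    rw [PySem.Chars.splitMax?, if_neg (by simpa [List.isEmpty_iff] using hp),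
      pv_splitOnMax_prefix name.toList p.toList hp h']
  rw [PySem.Str.splitMax?, hs]
  simp [PySem.Str.slice, PySem.Chars.slice_eq_listSlice, PySem.List.slice_from_natCast]

lemma pv_addA_diag (r : PySem.Set String) (name : String) :
    pvAddA (r, r) name = (PySem.Set.add r name, PySem.Set.add r name) := by
  simp only [pvAddA, PySem.Set.add]
  split_ifs <;> rfl

lemma pv_stepA_diag (r : PySem.Set String) (name : String) :
    pvStepA (r, r) name
      = ((pvItems name).foldl PySem.Set.add r, (pvItems name).foldl PySem.Set.add r) := by
  simp only [pvStepA, pvItems, pvMirror]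
  by_cases h1 : PySem.Str.startswith name "actor." = true
  · rw [if_pos h1, if_pos h1, pv_addA_diag,
      pv_split_eq_slice name "actor." 6 (by decide) (by decide) h1, pv_addA_diag]
    rfl
  · rw [if_neg h1, if_neg h1]
    by_cases h2 : PySem.Str.startswith name "actor_target." = true
    · rw [if_pos h2, if_pos h2, pv_addA_diag,
        pv_split_eq_slice name "actor_target." 13 (by decide) (by decide) h2, pv_addA_diag]
      rfl
    · rw [if_neg h2, if_neg h2, pv_addA_diag]
      rfl

lemma pv_foldA (l : List String) (r : PySem.Set String) :
    l.foldl pvStepA (r, r)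
      = ((l.flatMap pvItems).foldl PySem.Set.add r, (l.flatMap pvItems).foldl PySem.Set.add r) := by
  induction l generalizing r with
  | nil => rfl
  | cons x xs ih =>
    simp only [List.foldl_cons, pv_stepA_diag, List.flatMap_cons, List.foldl_append]
    exact ih _

lemma pv_foldB (l : List String) (acc : List String) :
    l.foldl (fun expanded name => expanded ++ pvItems name) acc = acc ++ l.flatMap pvItems := by
  induction l generalizing acc with
  | nil => simp
  | cons x xs ih => simp [List.foldl_cons, ih]

-- A's first-occurrence accumulation equals B's filter-based dedup
lemma pv_fold_eq_dedup (l acc : List String) :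
    l.foldl PySem.Set.add acc = acc ++ pvDedup (l.filter (fun n => !(acc.contains n))) := by
  induction l generalizing acc with
  | nil => simp [pvDedup]
  | cons x t ih =>
    simp only [List.foldl_cons, List.filter_cons]
    by_cases hx : x ∈ acc
    · have h : PySem.Set.add acc x = acc := by simp [PySem.Set.add, PySem.Set.contains, hx]
      rw [h]; simp [hx, ih]
    · have hadd : PySem.Set.add acc x = acc ++ [x] := by
        simp [PySem.Set.add, PySem.Set.contains, hx]
      rw [hadd, ih, if_pos (by simp [hx])]
      rw [show pvDedup (x :: t.filter (fun n => !(acc.contains n)))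
            = x :: pvDedup ((t.filter (fun n => !(acc.contains n))).filter (fun n => n != x))
          from by rw [pvDedup]]
      rw [List.filter_filter]
      have hfc : ∀ n : String, ((n != x) && !(acc.contains n)) = !((acc ++ [x]).contains n) := by
        intro n
        by_cases h1 : n = x <;> by_cases h2 : n ∈ acc <;> simp [h1, h2]
      simp only [hfc]
      simp

-- ===== VERDICT (by name: the statement is the Claim_ definition above) =====
theorem resolve_td3_lora_target_modules_spec : Claim_equal_resolve_td3_lora_target_modules := by
  intro tm _
  show resolve_td3_lora_target_modules tm = resolve_td3_lora_target_modules_alt tm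
  rw [resolve_td3_lora_target_modules, resolve_td3_lora_target_modules_alt]
  show (tm.foldl pvStepA ([], PySem.Set.empty)).1
      = pvDedup (tm.foldl (fun expanded name => expanded ++ pvItems name) [])
  rw [show (PySem.Set.empty : PySem.Set String) = [] from rfl, pv_foldA, pv_foldB]
  rw [pv_fold_eq_dedup]
  simp
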